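-- pv_equiv track=rewrite | github.com/alicesalmazi/lista_03_2sem.py | Lista03_AliceSalmazi_223344_2S_EC/lib/temperaturas.py | maiorSequencia
-- ===== SOURCE A (Python) =====
-- def maiorSequencia(temps, L):
--     atualSequencia = 0
--     maiorSequencia = 0
--     for i in temps:
--         if i > L:
--             atualSequencia += 1
--             if atualSequencia > maiorSequencia:
--                 maiorSequencia = atualSequencia
--         else:
--             atualSequencia = 0
--     return maiorSequencia
-- ===== SOURCE B (Python) =====
-- def maiorSequencia(temps, L):
--     # two-pointer run scan: jump over each maximal run above L in one inner sweep
--     best = 0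
--     i = 0
--     n = len(temps)
--     while i < n:
--         j = i
--         while j < n and temps[j] > L:
--             j += 1
--         if j - i > best:
--             best = j - i
--         i = j + 1
--     return best
-- ===== Notes on version B (the rewrite author's own statement) =====
-- stated objective: alternative
-- what changed: Replaces the running-counter-with-reset fold by a two-pointer run scan: an inner sweep measures each maximal run above L in full, the outer loop then jumps past it and keeps the maximum run length.
import Mathlib
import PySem

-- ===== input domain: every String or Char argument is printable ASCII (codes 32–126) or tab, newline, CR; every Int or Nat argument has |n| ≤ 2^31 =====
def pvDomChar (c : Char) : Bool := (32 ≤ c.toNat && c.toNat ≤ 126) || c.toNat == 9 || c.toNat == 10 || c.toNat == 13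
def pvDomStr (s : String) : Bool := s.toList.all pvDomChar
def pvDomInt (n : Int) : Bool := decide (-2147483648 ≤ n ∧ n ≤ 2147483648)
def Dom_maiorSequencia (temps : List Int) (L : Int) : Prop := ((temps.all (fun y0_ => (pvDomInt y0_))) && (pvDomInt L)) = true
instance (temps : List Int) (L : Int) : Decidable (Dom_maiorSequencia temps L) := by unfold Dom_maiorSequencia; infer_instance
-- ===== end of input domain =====

-- B replaces A's running-counter-with-reset fold by a two-pointer run scan (alternative decomposition, same cost).

-- ===== PORT A =====
-- literal port of A: left fold carrying (atualSequencia, maiorSequencia)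
def maiorSequencia (temps : List Int) (L : Int) : Int :=
  (temps.foldl (fun (st : Int × Int) i =>
      if i > L then
        let a := st.1 + 1
        (a, if a > st.2 then a else st.2)
      else (0, st.2)) ((0 : Int), (0 : Int))).2

-- ===== PORT B =====
-- inner while loop of Source B: length of the maximal run above L at the front (j - i)
def pvRunLen (L : Int) : List Int → Nat
  | [] => 0
  | x :: xs => if x > L then pvRunLen L xs + 1 else 0

-- outer while loop of Source B; advancing the index i to j+1 is modelled by dropping r+1 elements
def pvBGo (L : Int) : List Int → Int → Int
  | [], best => best
  | x :: xs, best =>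
      let r := pvRunLen L (x :: xs)
      pvBGo L ((x :: xs).drop (r + 1)) (if (r : Int) > best then (r : Int) else best)
  termination_by rest _ => rest.length
  decreasing_by simp [List.length_drop]

def maiorSequencia_alt (temps : List Int) (L : Int) : Int :=
  pvBGo L temps 0

-- ===== PRECONDITION & SPEC =====
def Spec_maiorSequencia (temps : List Int) (L : Int) (out : Int) : Prop := out = maiorSequencia_alt temps L
instance (temps : List Int) (L : Int) (out : Int) : Decidable (Spec_maiorSequencia temps L out) := by unfold Spec_maiorSequencia; infer_instance

-- ===== CLAIM (what is proved, stated in full; the proofs are below) =====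
def Claim_equal_maiorSequencia : Prop := ∀ (temps : List Int) (L : Int), Dom_maiorSequencia temps L → Spec_maiorSequencia temps L (maiorSequencia temps L)

-- ===== LEMMAS AND PROOFS =====

lemma pvBGo_nil (L b : Int) : pvBGo L [] b = b := by
  unfold pvBGo
  rfl

lemma pvBGo_cons (L : Int) (x : Int) (xs : List Int) (b : Int) :
    pvBGo L (x :: xs) b =
      pvBGo L ((x :: xs).drop (pvRunLen L (x :: xs) + 1))
        (if (pvRunLen L (x :: xs) : Int) > b then (pvRunLen L (x :: xs) : Int) else b) := by
  rw [pvBGo.eq_def]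

-- invariant of A's fold related to B's run scan
lemma foldA_eq (L : Int) :
    ∀ (temps : List Int) (a m : Int), 0 ≤ a → a ≤ m →
      (temps.foldl (fun (st : Int × Int) i =>
          if i > L then
            let a := st.1 + 1
            (a, if a > st.2 then a else st.2)
          else (0, st.2)) (a, m)).2 =
      pvBGo L (temps.drop (pvRunLen L temps + 1))
        (if (pvRunLen L temps : Int) + a > m then (pvRunLen L temps : Int) + a else m) := by
  intro temps
  induction temps with
  | nil =>
      intro a m ha ham
      simp [pvRunLen, pvBGo_nil]
      omega
  | cons x xs ih =>
      intro a m ha ham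
      by_cases hx : x > L
      · have h1 : (0 : Int) ≤ a + 1 := by omega
        have h2 : a + 1 ≤ (if a + 1 > m then a + 1 else m) := by split_ifs <;> try omega
        simp only [List.foldl_cons, if_pos hx]
        rw [ih (a + 1) (if a + 1 > m then a + 1 else m) h1 h2]
        have hr : pvRunLen L (x :: xs) = pvRunLen L xs + 1 := by simp [pvRunLen, hx]
        rw [hr]
        have hdrop : (x :: xs).drop (pvRunLen L xs + 1 + 1) = xs.drop (pvRunLen L xs + 1) := rfl
        rw [hdrop]
        congr 1
        push_cast
        split_ifs <;> try omega
      · simp only [List.foldl_cons, if_neg hx]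
        rw [ih 0 m le_rfl (le_trans ha ham)]
        have hr : pvRunLen L (x :: xs) = 0 := by simp [pvRunLen, hx]
        rw [hr]
        simp only [Nat.cast_zero, List.drop_succ_cons, List.drop_zero]
        have hifa : (if (0 : Int) + a > m then (0 : Int) + a else m) = m := by
          split_ifs <;> try omega
        rw [hifa]
        cases xs with
        | nil => simp [pvRunLen, pvBGo_nil]; omega
        | cons y ys =>
            rw [pvBGo_cons L y ys m]
            congr 1

-- ===== VERDICT (by name: the statement is the Claim_ definition above) =====
theorem maiorSequencia_spec : Claim_equal_maiorSequencia := by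
  intro temps L _
  unfold Spec_maiorSequencia maiorSequencia maiorSequencia_alt
  rw [foldA_eq L temps 0 0 le_rfl le_rfl]
  cases temps with
  | nil => simp [pvRunLen, pvBGo_nil]
  | cons x xs =>
      rw [pvBGo_cons L x xs 0]
      congr 1
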